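-- pv_equiv track=rewrite | github.com/martinluque12/Programacion-y-Laboratorio-1-Primer-cuatrimestre-UTN | Clase 7/Ejercicio_tarea/funciones.py | calcular_temperatura_maxima
-- ===== SOURCE A (Python) =====
-- def calcular_temperatura_maxima(lista:list)->list:
--     '''
--     Recorre la lista y busca la temperatura maxima y si se repite algún otro dia, las agrega a una lista
--     de diccionarios.
--
--     Recibe la lista de diccionarios.
--
--     Retorna una lista de diccionarios que contiene los días que contienen la temperatura maxima encontrada.
--     '''
--     if type(lista) == type(list()) and len(lista) > 0:
--         temperatura_maxima = lista[0]
--         lista_tem_maximas = []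
--         for temperatura in lista:
--             if temperatura["temperatura"] > temperatura_maxima["temperatura"]:
--                 temperatura_maxima = temperatura
--
--         for dia in lista:
--             if dia["temperatura"] == temperatura_maxima["temperatura"]:
--                 lista_tem_maximas.append(dia)
--
--     return lista_tem_maximas
-- ===== SOURCE B (Python) =====
-- def calcular_temperatura_maxima(lista: list) -> list:
--     # One resetting pass instead of A's two scans (max pass + filter pass);
--     # same guard and return placement as A.
--     if type(lista) == type(list()) and len(lista) > 0:
--         maxima = lista[0]["temperatura"]
--         lista_tem_maximas = [lista[0]]
--         for dia in lista[1:]: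
--             t = dia["temperatura"]
--             if t > maxima:
--                 maxima = t
--                 lista_tem_maximas = [dia]
--             elif t == maxima:
--                 lista_tem_maximas.append(dia)
--
--     return lista_tem_maximas
-- ===== Notes on version B (the rewrite author's own statement) =====
-- stated objective: alternative
-- what changed: Replaces A's two sequential scans (first find the maximum temperature, then filter the days matching it) by a single resetting pass that keeps a running maximum together with the current list of candidate days.
import Mathlib
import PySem

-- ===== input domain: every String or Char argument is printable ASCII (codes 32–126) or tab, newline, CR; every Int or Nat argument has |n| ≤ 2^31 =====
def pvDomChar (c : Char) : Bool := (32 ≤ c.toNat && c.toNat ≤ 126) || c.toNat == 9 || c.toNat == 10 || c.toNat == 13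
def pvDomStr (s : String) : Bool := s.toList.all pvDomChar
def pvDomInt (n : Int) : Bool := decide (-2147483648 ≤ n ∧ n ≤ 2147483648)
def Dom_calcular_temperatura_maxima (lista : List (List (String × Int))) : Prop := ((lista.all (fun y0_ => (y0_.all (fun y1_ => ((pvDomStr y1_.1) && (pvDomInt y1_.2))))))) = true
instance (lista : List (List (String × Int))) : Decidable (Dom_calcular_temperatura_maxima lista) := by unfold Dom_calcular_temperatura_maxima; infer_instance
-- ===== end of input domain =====

-- B merges A's two scans (max-finding pass, then filter pass) into one resetting pass.
-- Equivalence is about the RETURN value; neither program mutates its argument.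

-- d["temperatura"]: first-match lookup in the association list (key presence is Pre_'s job)
def pvTemp (d : List (String × Int)) : Int := (List.lookup "temperatura" d).getD 0

-- ===== PORT A =====
def calcular_temperatura_maxima (lista : List (List (String × Int))) : List (List (String × Int)) :=
  match lista with
  | [] => []          -- unreachable under Pre_ (Python raises UnboundLocalError)
  | h :: t =>
    let temperatura_maxima :=
      (h :: t).foldl (fun m d => if pvTemp d > pvTemp m then d else m) h
    (h :: t).foldl
      (fun acc d => if pvTemp d = pvTemp temperatura_maxima then acc ++ [d] else acc) []

-- ===== PORT B =====
def pvGoB (m : Int) (cands : List (List (String × Int))) :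
    List (List (String × Int)) → List (List (String × Int))
  | [] => cands
  | d :: rest =>
    if pvTemp d > m then pvGoB (pvTemp d) [d] rest
    else if pvTemp d = m then pvGoB m (cands ++ [d]) rest
    else pvGoB m cands rest

def calcular_temperatura_maxima_alt (lista : List (List (String × Int))) : List (List (String × Int)) :=
  match lista with
  | [] => []          -- unreachable under Pre_ (Python raises UnboundLocalError)
  | h :: t => pvGoB (pvTemp h) [h] t

-- ===== PRECONDITION & SPEC =====
-- Pre_ excludes exactly the inputs where the Python A raises: the empty list
-- (UnboundLocalError at the return) and lists with a day missing the
-- "temperatura" key (KeyError).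
def Pre_calcular_temperatura_maxima (lista : List (List (String × Int))) : Prop :=
  lista ≠ [] ∧ ∀ d ∈ lista, (List.lookup "temperatura" d).isSome = true
instance (lista : List (List (String × Int))) : Decidable (Pre_calcular_temperatura_maxima lista) := by unfold Pre_calcular_temperatura_maxima; infer_instance

def pvWitness_calcular_temperatura_maxima : (List (List (String × Int))) :=
  [[("dia", 1), ("temperatura", 25)], [("dia", 2), ("temperatura", 25)], [("dia", 3), ("temperatura", 10)]]

def Spec_calcular_temperatura_maxima (lista : List (List (String × Int))) (out : List (List (String × Int))) : Prop := out = calcular_temperatura_maxima_alt lista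
instance (lista : List (List (String × Int))) (out : List (List (String × Int))) : Decidable (Spec_calcular_temperatura_maxima lista out) := by unfold Spec_calcular_temperatura_maxima; infer_instance

-- ===== CLAIM (what is proved, stated in full; the proofs are below) =====
def Claim_equal_calcular_temperatura_maxima : Prop := ∀ (lista : List (List (String × Int))), Dom_calcular_temperatura_maxima lista → Pre_calcular_temperatura_maxima lista → Spec_calcular_temperatura_maxima lista (calcular_temperatura_maxima lista)

-- ===== LEMMAS AND PROOFS =====

-- the max-fold of A, over the tail
def pvMaxF (m : List (String × Int)) (l : List (List (String × Int))) : List (String × Int) :=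
  l.foldl (fun m d => if pvTemp d > pvTemp m then d else m) m

theorem pvMaxF_ge (m : List (String × Int)) (l : List (List (String × Int))) :
    pvTemp m ≤ pvTemp (pvMaxF m l) := by
  induction l generalizing m with
  | nil => simp [pvMaxF]
  | cons d rest ih =>
    simp only [pvMaxF, List.foldl_cons]
    split_ifs with h
    · exact le_of_lt (lt_of_lt_of_le h (ih d))
    · exact ih m

-- invariant of B's single resetting pass, relative to A's final maximum
theorem pvGoB_eq (rest : List (List (String × Int))) (m : List (String × Int))
    (cands : List (List (String × Int))) :
    pvGoB (pvTemp m) cands rest =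
      (if pvTemp (pvMaxF m rest) = pvTemp m then cands else []) ++
        rest.filter (fun d => pvTemp d = pvTemp (pvMaxF m rest)) := by
  induction rest generalizing m cands with
  | nil => simp [pvGoB, pvMaxF]
  | cons d rest ih =>
    simp only [pvGoB]
    by_cases h : pvTemp d > pvTemp m
    · have hM : pvMaxF m (d :: rest) = pvMaxF d rest := by
        simp [pvMaxF, List.foldl_cons, h]
      rw [if_pos h, hM, ih d [d]]
      have hge : pvTemp d ≤ pvTemp (pvMaxF d rest) := pvMaxF_ge d rest
      have hne : pvTemp (pvMaxF d rest) ≠ pvTemp m := by omega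
      rw [if_neg hne]
      simp only [List.filter_cons, List.nil_append]
      split_ifs with h1 h2 <;> simp_all
    · have hM : pvMaxF m (d :: rest) = pvMaxF m rest := by
        simp [pvMaxF, List.foldl_cons, h]
      rw [if_neg h, hM]
      by_cases he : pvTemp d = pvTemp m
      · rw [if_pos he, ih m (cands ++ [d])]
        by_cases hX : pvTemp (pvMaxF m rest) = pvTemp m
        · rw [if_pos hX, if_pos hX]
          simp [he, hX]
        · rw [if_neg hX, if_neg hX]
          simp [List.filter_cons]
          intro hc; omega
      · rw [if_neg he, ih m cands]
        have hlt : pvTemp d < pvTemp m := by omega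
        have hge : pvTemp m ≤ pvTemp (pvMaxF m rest) := pvMaxF_ge m rest
        simp [List.filter_cons]
        intro hc; omega

-- ===== VERDICT (by name: the statement is the Claim_ definition above) =====
theorem calcular_temperatura_maxima_spec : Claim_equal_calcular_temperatura_maxima := by
  intro lista _ hpre
  unfold Spec_calcular_temperatura_maxima
  match lista with
  | [] => exact absurd rfl hpre.1
  | h :: t =>
    simp only [calcular_temperatura_maxima, calcular_temperatura_maxima_alt]
    rw [pvGoB_eq t h [h]]
    rw [PySem.List.foldl_append_ite_eq_filter]
    have hfold : (h :: t).foldl (fun m d => if pvTemp d > pvTemp m then d else m) h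
        = pvMaxF h t := by
      simp [pvMaxF, List.foldl_cons]
    rw [hfold]
    simp only [List.nil_append, List.filter_cons]
    by_cases hM : pvTemp (pvMaxF h t) = pvTemp h
    · simp [hM]
    · have h2 : ¬ pvTemp h = pvTemp (pvMaxF h t) := fun he => hM he.symm
      simp [hM, h2]
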